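-- pv_equiv track=rewrite | github.com/hugdebart/compressionHuffman- | Huffman.py | formatCompresse
-- ===== SOURCE A (Python) =====
-- def formatCompresse(texte):
--     txtTrans = ''
--     txtOct = ''
--     #On cree une chaine de caractere sans espaces
--     for k in texte :
--         if k != " ":
--             txtTrans += k
--     #On rajoute des espaces tous les 8 caracteres
--     for i in range(len(txtTrans)):
--         if (i % 8) == 0 and i != 0:
--             txtOct += ' '
--         txtOct += txtTrans[i]
--     return txtOct
-- ===== SOURCE B (Python) =====
-- def formatCompresse(texte):
--     s = ''.join(c for c in texte if c != ' ')
--     blocks = []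
--     i = 0
--     while i < len(s):
--         blocks.append(s[i:i+8])
--         i += 8
--     return ' '.join(blocks)
-- ===== Notes on version B (the rewrite author's own statement) =====
-- stated objective: faster
-- what changed: B strips spaces with a filtering join and then slices the space-free string into 8-character blocks joined with ' ', replacing A's per-character index loop with its modulo-8 conditional by per-block slicing and a single join (fewer per-character string concatenations).
import Mathlib
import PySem

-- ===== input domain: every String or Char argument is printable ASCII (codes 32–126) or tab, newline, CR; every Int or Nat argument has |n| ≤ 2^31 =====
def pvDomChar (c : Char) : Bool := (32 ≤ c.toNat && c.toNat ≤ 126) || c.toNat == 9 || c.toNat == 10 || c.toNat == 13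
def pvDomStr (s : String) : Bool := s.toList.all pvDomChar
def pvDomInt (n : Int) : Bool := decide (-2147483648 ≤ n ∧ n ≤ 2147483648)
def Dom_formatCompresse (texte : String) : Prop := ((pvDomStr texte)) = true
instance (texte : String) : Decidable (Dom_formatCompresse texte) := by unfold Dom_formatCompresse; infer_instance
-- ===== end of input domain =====

-- B strips spaces with a filtering join and slices the result into 8-character blocks
-- joined by ' ', replacing A's per-character index loop with its modulo-8 branch (idiomatic).

-- ===== PORT A =====
-- A: first loop filters out spaces by concatenation; second loop walks indices
-- 0..len-1 inserting ' ' whenever i % 8 == 0 and i != 0. txtTrans[i] is always in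
-- range (i < len txtTrans), so the total `getD i ' '` is exact here.
def formatCompresse (texte : String) : String :=
  let txtTrans : List Char :=
    texte.toList.foldl (fun acc k => if k ≠ ' ' then acc ++ [k] else acc) []
  let txtOct : List Char :=
    (List.range txtTrans.length).foldl
      (fun acc i =>
        (if i % 8 = 0 ∧ i ≠ 0 then acc ++ [' '] else acc) ++ [txtTrans.getD i ' '])
      []
  String.mk txtOct

-- ===== PORT B =====
-- Source B's while loop: for i = 0, 8, 16, ... < len(s), collect the slice s[i:i+8].
def pvBlocksFrom (s : List Char) (i : Nat) : List (List Char) :=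
  if h : i < s.length then
    (PySem.List.slice s (some (i : Int)) (some ((i : Int) + 8))) :: pvBlocksFrom s (i + 8)
  else []
  termination_by s.length - i
  decreasing_by omega

def formatCompresse_alt (texte : String) : String :=
  let s : List Char := texte.toList.filter (fun c => c ≠ ' ')   -- ''.join(c for c in texte if c != ' ')
  String.mk (PySem.Chars.join [' '] (pvBlocksFrom s 0))         -- ' '.join(blocks)

-- ===== PRECONDITION & SPEC =====
def Spec_formatCompresse (texte : String) (out : String) : Prop := out = formatCompresse_alt texte
instance (texte : String) (out : String) : Decidable (Spec_formatCompresse texte out) := by unfold Spec_formatCompresse; infer_instance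

-- ===== CLAIM (what is proved, stated in full; the proofs are below) =====
def Claim_equal_formatCompresse : Prop := ∀ (texte : String), Dom_formatCompresse texte → Spec_formatCompresse texte (formatCompresse texte)

-- ===== LEMMAS AND PROOFS =====

-- proof-side view of the block loop: structural recursion peeling take 8 / drop 8
def pvBlocks : List Char → List (List Char)
  | [] => []
  | c :: cs => ((c :: cs).take 8) :: pvBlocks ((c :: cs).drop 8)
  termination_by l => l.length
  decreasing_by simp


theorem pvBlocks_nil : pvBlocks [] = [] := by simp [pvBlocks]

theorem pvBlocks_expand (l : List Char) (h : l ≠ []) :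
    pvBlocks l = l.take 8 :: pvBlocks (l.drop 8) := by
  cases l with
  | nil => exact absurd rfl h
  | cons c cs => rw [pvBlocks.eq_2]

theorem pvBlocksFrom_eq (s : List Char) (i : Nat) :
    pvBlocksFrom s i = pvBlocks (s.drop i) := by
  rw [pvBlocksFrom]
  by_cases h : i < s.length
  · rw [dif_pos h, pvBlocksFrom_eq s (i + 8)]
    have hs : PySem.List.slice s (some (i : Int)) (some ((i : Int) + 8))
        = (s.drop i).take 8 := by
      have h8 : ((i : Int) + 8) = ((i + 8 : Nat) : Int) := by push_cast; ring
      rw [h8, PySem.List.slice_natCast]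
      congr 1
      omega
    have hne : s.drop i ≠ [] := by
      intro hnil
      have := congrArg List.length hnil
      simp at this
      omega
    rw [pvBlocks_expand _ hne, hs, List.drop_drop]
  · rw [dif_neg h, List.drop_eq_nil_of_le (by omega), pvBlocks_nil]
  termination_by s.length - i
  decreasing_by omega



-- appending one character to the text appends, in the joined block string,
-- a ' ' before it exactly when the old length is a positive multiple of 8
theorem pvJoin_append (l : List Char) (c : Char) :
    PySem.Chars.join [' '] (pvBlocks (l ++ [c]))
      = PySem.Chars.join [' '] (pvBlocks l)
        ++ (if l.length % 8 = 0 ∧ l.length ≠ 0 then [' ', c] else [c]) := by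
  rcases eq_or_ne l [] with hl | hl
  · subst hl
    have h1 : pvBlocks [c] = [[c]] := by
      rw [pvBlocks_expand _ (by simp)]; simp [pvBlocks_nil]
    rw [List.nil_append, h1, pvBlocks_nil, PySem.Chars.join_singleton,
        PySem.Chars.join_nil]
    simp
  · have hlen0 : l.length ≠ 0 := by simp [hl]
    by_cases h8 : 8 ≤ l.length
    · have hblocks : pvBlocks (l ++ [c]) = l.take 8 :: pvBlocks (l.drop 8 ++ [c]) := by
        rw [pvBlocks_expand _ (by simp), List.take_append_of_le_length h8,
            List.drop_append_of_le_length h8]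
      have hblocksl : pvBlocks l = l.take 8 :: pvBlocks (l.drop 8) :=
        pvBlocks_expand l hl
      by_cases heq : l.length = 8
      · -- exactly one full block: the appended character opens a second one
        have hd : l.drop 8 = [] := List.eq_nil_of_length_eq_zero (by simp [heq])
        have ht : l.take 8 = l := List.take_of_length_le (by omega)
        have hb2 : pvBlocks (l.drop 8 ++ [c]) = [[c]] := by
          rw [hd, List.nil_append, pvBlocks_expand _ (by simp)]; simp [pvBlocks_nil]
        rw [hblocks, hb2, ht, hblocksl, hd, ht, pvBlocks_nil,
            PySem.Chars.join_cons_cons, PySem.Chars.join_singleton,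
            PySem.Chars.join_singleton, if_pos ⟨by omega, by omega⟩]
        simp
      · -- more than one block remains after the first
        have IH := pvJoin_append (l.drop 8) c
        have hd : l.drop 8 ≠ [] := by
          intro h; have := congrArg List.length h; simp at this; omega
        have hb2 := pvBlocks_expand (l.drop 8 ++ [c]) (by simp)
        have hb3 := pvBlocks_expand (l.drop 8) hd
        rw [hblocks, hb2, PySem.Chars.join_cons_cons, ← hb2, IH,
            hblocksl, hb3, PySem.Chars.join_cons_cons, ← hb3]
        have hc : ((l.drop 8).length % 8 = 0 ∧ (l.drop 8).length ≠ 0)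
            ↔ (l.length % 8 = 0 ∧ l.length ≠ 0) := by
          simp only [List.length_drop]; omega
        rw [if_congr hc rfl rfl]
        simp
    · -- the whole of l ++ [c] is a single block
      have hb : pvBlocks (l ++ [c]) = [l ++ [c]] := by
        rw [pvBlocks_expand _ (by simp),
            List.take_of_length_le (by simp; omega),
            List.drop_eq_nil_of_le (by simp; omega), pvBlocks_nil]
      have hbl : pvBlocks l = [l] := by
        rw [pvBlocks_expand _ hl, List.take_of_length_le (by omega),
            List.drop_eq_nil_of_le (by omega), pvBlocks_nil]
      rw [hb, hbl, PySem.Chars.join_singleton, PySem.Chars.join_singleton,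
          if_neg (by omega)]
  termination_by l.length
  decreasing_by simp; omega

-- A's second loop, read off one appended character at a time, produces the joined blocks
theorem pvLoop (l : List Char) :
    (List.range l.length).foldl
        (fun acc i =>
          (if i % 8 = 0 ∧ i ≠ 0 then acc ++ [' '] else acc) ++ [l.getD i ' '])
        []
      = PySem.Chars.join [' '] (pvBlocks l) := by
  induction l using List.reverseRecOn with
  | nil =>
    simp only [List.length_nil, List.range_zero, List.foldl_nil]
    rw [pvBlocks_nil, PySem.Chars.join_nil]
  | append_singleton l c IH =>
    have hlen : (l ++ [c]).length = l.length + 1 := by simp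
    rw [hlen, List.range_succ, List.foldl_append]
    have hcongr :
        (List.range l.length).foldl
            (fun acc i =>
              (if i % 8 = 0 ∧ i ≠ 0 then acc ++ [' '] else acc) ++ [(l ++ [c]).getD i ' '])
            []
          = (List.range l.length).foldl
              (fun acc i =>
                (if i % 8 = 0 ∧ i ≠ 0 then acc ++ [' '] else acc) ++ [l.getD i ' '])
              [] := by
      apply PySem.List.foldl_congr_mem
      intro acc x hx
      rw [List.getD_append _ _ _ _ (List.mem_range.mp hx)]
    have hgetc : (l ++ [c]).getD l.length ' ' = c := by simp [List.getD]
    rw [hcongr, IH, pvJoin_append]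
    simp only [List.foldl_cons, List.foldl_nil, hgetc]
    by_cases hc : l.length % 8 = 0 ∧ l.length ≠ 0
    · rw [if_pos hc, if_pos hc]; simp
    · rw [if_neg hc, if_neg hc]

-- ===== VERDICT (by name: the statement is the Claim_ definition above) =====
theorem formatCompresse_spec : Claim_equal_formatCompresse := by
  intro texte _
  unfold Spec_formatCompresse formatCompresse formatCompresse_alt
  simp only [PySem.List.foldl_append_ite_eq_filter (fun k => k ≠ ' ') texte.toList [],
    List.nil_append]
  rw [pvLoop, pvBlocksFrom_eq, List.drop_zero]
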